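-- pv_equiv track=rewrite | github.com/Kai-ruri/MahjongAI | mahjong_engine.py | check_yakuhai
-- ===== SOURCE A (Python) =====
-- def check_yakuhai(closed_mentsu, fixed_mentsu, bakaze, jikaze):
--     """役牌（白發中・場風・自風）：各1翻"""
--     han = 0
--     all_mentsu = closed_mentsu + fixed_mentsu
--     yakuhai_tiles = {31, 32, 33, 27 + bakaze, 27 + jikaze}
--
--     for m in all_mentsu:
--         if m[0] == m[1] == m[2] and m[0] in yakuhai_tiles:
--             han += 1
--             # ダブ東などの連風牌は2翻にする処理
--             if m[0] == 27 + bakaze and m[0] == 27 + jikaze: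
--                 han += 1
--     return han
-- ===== SOURCE B (Python) =====
-- def check_yakuhai(closed_mentsu, fixed_mentsu, bakaze, jikaze):
--     """役牌（白發中・場風・自風）：各1翻"""
--     # Tally all triplet heads once, then look up the yakuhai tiles in the tally.
--     counts = {}
--     for m in closed_mentsu + fixed_mentsu:
--         if m[0] == m[1] == m[2]:
--             counts[m[0]] = counts.get(m[0], 0) + 1
--     han = sum(counts.get(t, 0) for t in {31, 32, 33, 27 + bakaze, 27 + jikaze})
--     if bakaze == jikaze:
--         # double-wind triplets are worth one extra han
--         han += counts.get(27 + bakaze, 0)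
--     return han
-- ===== Notes on version B (the rewrite author's own statement) =====
-- stated objective: alternative
-- what changed: B tallies triplet heads into a dict in one pass and then sums the tally at the five yakuhai tiles (plus the tally at the wind tile once more when bakaze == jikaze), instead of A's per-meld membership test with an inner double-wind branch.
import Mathlib
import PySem

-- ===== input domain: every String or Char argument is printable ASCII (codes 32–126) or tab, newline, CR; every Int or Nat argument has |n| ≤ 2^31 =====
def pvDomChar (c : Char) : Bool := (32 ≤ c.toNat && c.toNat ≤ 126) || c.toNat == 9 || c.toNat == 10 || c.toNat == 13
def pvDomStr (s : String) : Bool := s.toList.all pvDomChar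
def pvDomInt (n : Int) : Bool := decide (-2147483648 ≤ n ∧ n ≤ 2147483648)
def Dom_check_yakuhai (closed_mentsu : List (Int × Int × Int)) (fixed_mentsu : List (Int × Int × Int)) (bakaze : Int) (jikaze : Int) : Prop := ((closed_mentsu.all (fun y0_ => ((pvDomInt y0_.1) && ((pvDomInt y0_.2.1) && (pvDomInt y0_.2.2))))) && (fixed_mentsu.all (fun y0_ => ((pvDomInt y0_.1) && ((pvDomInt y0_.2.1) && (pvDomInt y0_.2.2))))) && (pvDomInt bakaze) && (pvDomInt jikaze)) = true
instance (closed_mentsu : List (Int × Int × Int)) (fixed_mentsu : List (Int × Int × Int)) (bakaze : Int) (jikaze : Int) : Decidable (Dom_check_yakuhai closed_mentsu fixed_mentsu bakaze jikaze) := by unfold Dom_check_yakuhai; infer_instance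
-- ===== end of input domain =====

-- B replaces A's per-meld membership test (with its inner double-wind branch) by a one-pass
-- tally of triplet heads that is then summed at the yakuhai tiles; same cost, alternative structure.

-- ===== PORT A =====
def check_yakuhai (closed_mentsu : List (Int × Int × Int)) (fixed_mentsu : List (Int × Int × Int)) (bakaze : Int) (jikaze : Int) : Int :=
  let all_mentsu := closed_mentsu ++ fixed_mentsu
  let yakuhai_tiles : PySem.Set Int := PySem.Set.ofList [31, 32, 33, 27 + bakaze, 27 + jikaze]
  all_mentsu.foldl (fun han m =>
    if m.1 = m.2.1 ∧ m.2.1 = m.2.2 ∧ yakuhai_tiles.contains m.1 then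
      let han := han + 1
      if m.1 = 27 + bakaze ∧ m.1 = 27 + jikaze then han + 1 else han
    else han) 0

-- ===== PORT B =====
def check_yakuhai_alt (closed_mentsu : List (Int × Int × Int)) (fixed_mentsu : List (Int × Int × Int)) (bakaze : Int) (jikaze : Int) : Int :=
  let counts : PySem.Dict Int Int :=
    (closed_mentsu ++ fixed_mentsu).foldl (fun d m =>
      if m.1 = m.2.1 ∧ m.2.1 = m.2.2 then d.insert m.1 (d.getD m.1 0 + 1) else d) PySem.Dict.empty
  -- sum over a Python set: order-insensitive (a sum of ints)
  let han := ((PySem.Set.ofList [31, 32, 33, 27 + bakaze, 27 + jikaze]).map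
      (fun t => counts.getD t 0)).sum
  if bakaze = jikaze then han + counts.getD (27 + bakaze) 0 else han

-- ===== PRECONDITION & SPEC =====
def Spec_check_yakuhai (closed_mentsu : List (Int × Int × Int)) (fixed_mentsu : List (Int × Int × Int)) (bakaze : Int) (jikaze : Int) (out : Int) : Prop := out = check_yakuhai_alt closed_mentsu fixed_mentsu bakaze jikaze
instance (closed_mentsu : List (Int × Int × Int)) (fixed_mentsu : List (Int × Int × Int)) (bakaze : Int) (jikaze : Int) (out : Int) : Decidable (Spec_check_yakuhai closed_mentsu fixed_mentsu bakaze jikaze out) := by unfold Spec_check_yakuhai; infer_instance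

-- ===== CLAIM (what is proved, stated in full; the proofs are below) =====
def Claim_equal_check_yakuhai : Prop := ∀ (closed_mentsu : List (Int × Int × Int)) (fixed_mentsu : List (Int × Int × Int)) (bakaze : Int) (jikaze : Int), Dom_check_yakuhai closed_mentsu fixed_mentsu bakaze jikaze → Spec_check_yakuhai closed_mentsu fixed_mentsu bakaze jikaze (check_yakuhai closed_mentsu fixed_mentsu bakaze jikaze)

-- ===== LEMMAS AND PROOFS =====

-- per-meld score of A, as a function of the meld
def wA (bakaze jikaze : Int) (m : Int × Int × Int) : Int :=
  if m.1 = m.2.1 ∧ m.2.1 = m.2.2 ∧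
      (PySem.Set.ofList [31, 32, 33, 27 + bakaze, 27 + jikaze]).contains m.1 then
    (if m.1 = 27 + bakaze ∧ m.1 = 27 + jikaze then 2 else 1)
  else 0

-- sum over a Nodup list of the indicator of one element
theorem sum_indicator_nodup (t : Int) (d : List Int) (hd : d.Nodup) :
    (d.map (fun k => if k = t then (1 : Int) else 0)).sum
      = if t ∈ d then (1 : Int) else 0 := by
  induction d with
  | nil => simp
  | cons a d' ihd =>
    have hnd' : d'.Nodup := (List.nodup_cons.mp hd).2
    by_cases ha : a = t
    · subst ha
      have hnm : a ∉ d' := (List.nodup_cons.mp hd).1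
      have : (d'.map (fun k => if k = a then (1 : Int) else 0)).sum = 0 := by
        rw [ihd hnd']; simp [hnm]
      simp [List.map_cons, List.sum_cons, this]
    · have hiff : (t ∈ a :: d') ↔ t ∈ d' := by
        constructor
        · intro h; rcases List.mem_cons.mp h with h | h
          · exact absurd h.symm ha
          · exact h
        · exact fun h => List.mem_cons_of_mem a h
      by_cases ht : t ∈ d' <;>
        simp [List.map_cons, List.sum_cons, ha, ihd hnd', hiff, ht]

-- sum of counts over a Nodup index list = countP of membership
theorem sum_count_nodup (d l : List Int) (hd : d.Nodup) :
    (d.map (fun k => (l.count k : Int))).sum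
      = (l.countP (fun t => decide (t ∈ d)) : Int) := by
  induction l with
  | nil => simp
  | cons t l' ih =>
    have h1 : (d.map (fun k => ((t :: l').count k : Int))).sum
        = (d.map (fun k => (l'.count k : Int))).sum
          + (d.map (fun k => if k = t then (1 : Int) else 0)).sum := by
      rw [← PySem.List.sum_map_add_int]
      refine congrArg List.sum (List.map_congr_left ?_)
      intro k _
      rw [List.count_cons]
      by_cases hk : k = t <;> simp [hk, Ne.symm]
    rw [h1, sum_indicator_nodup t d hd, List.countP_cons, ih]
    by_cases ht : t ∈ d <;> simp [ht]

-- pointwise: the per-tile score splits into membership plus a double-wind bonus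
theorem w_split (bakaze jikaze t : Int) :
    (if t ∈ (PySem.Set.ofList [31, 32, 33, 27 + bakaze, 27 + jikaze] : List Int)
        then (1 : Int) else 0)
      + (if bakaze = jikaze then (if t = 27 + bakaze then (1 : Int) else 0) else 0)
    = (if t ∈ (PySem.Set.ofList [31, 32, 33, 27 + bakaze, 27 + jikaze] : List Int)
        then (if t = 27 + bakaze ∧ t = 27 + jikaze then (2 : Int) else 1) else 0) := by
  by_cases hb : bakaze = jikaze
  · subst hb
    by_cases ht : t = 27 + bakaze
    · simp [ht]
    · simp [ht]
  · have hne : ¬ (t = 27 + bakaze ∧ t = 27 + jikaze) := by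
      rintro ⟨h1, h2⟩; exact hb (by omega)
    simp [hb, hne]

-- the tally-and-lookup total over a list of heads equals the per-head score sum
theorem heads_total (bakaze jikaze : Int) (hs : List Int) :
    (hs.countP (fun t =>
        decide (t ∈ (PySem.Set.ofList [31, 32, 33, 27 + bakaze, 27 + jikaze] : List Int))) : Int)
      + (if bakaze = jikaze then (hs.count (27 + bakaze) : Int) else 0)
    = (hs.map (fun t =>
        if t ∈ (PySem.Set.ofList [31, 32, 33, 27 + bakaze, 27 + jikaze] : List Int)
        then (if t = 27 + bakaze ∧ t = 27 + jikaze then (2 : Int) else 1) else 0)).sum := by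
  induction hs with
  | nil => simp
  | cons t hs ih =>
    rw [List.map_cons, List.sum_cons, ← ih, List.countP_cons, List.count_cons, ← w_split]
    by_cases hS : t ∈ (PySem.Set.ofList [31, 32, 33, 27 + bakaze, 27 + jikaze] : List Int) <;>
      by_cases hb : bakaze = jikaze <;> by_cases ht : t = 27 + bakaze <;>
        simp [hS, hb, ht] <;> ring

-- a sum of wA over melds is a sum of the per-tile score over the triplet heads
theorem sum_wA_eq (bakaze jikaze : Int) (l : List (Int × Int × Int)) :
    (l.map (wA bakaze jikaze)).sum
      = (((l.filter (fun m => decide (m.1 = m.2.1 ∧ m.2.1 = m.2.2))).map (·.1)).map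
          (fun t => if t ∈ (PySem.Set.ofList [31, 32, 33, 27 + bakaze, 27 + jikaze] : List Int)
            then (if t = 27 + bakaze ∧ t = 27 + jikaze then (2 : Int) else 1) else 0)).sum := by
  induction l with
  | nil => simp
  | cons m l ih =>
    by_cases htrip : m.1 = m.2.1 ∧ m.2.1 = m.2.2
    · by_cases hS : (PySem.Set.ofList [31, 32, 33, 27 + bakaze, 27 + jikaze] : List Int).contains m.1
      · simp [wA, htrip, ih]
      · simp [wA, htrip, ih]
    · rcases Decidable.em (m.1 = m.2.1) with h1 | h1
      · have h2 : ¬ m.2.1 = m.2.2 := fun h => htrip ⟨h1, h⟩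
        simp [wA, h1, h2, ih]
      · simp [wA, h1, ih]

-- ===== VERDICT (by name: the statement is the Claim_ definition above) =====
theorem check_yakuhai_spec : Claim_equal_check_yakuhai := by
  intro closed_mentsu fixed_mentsu bakaze jikaze _
  unfold Spec_check_yakuhai check_yakuhai check_yakuhai_alt
  dsimp only
  set l := closed_mentsu ++ fixed_mentsu with hl
  set S : PySem.Set Int := PySem.Set.ofList [31, 32, 33, 27 + bakaze, 27 + jikaze] with hS
  -- A's loop is a sum of per-meld scores
  have hA : l.foldl (fun han m =>
      if m.1 = m.2.1 ∧ m.2.1 = m.2.2 ∧ S.contains m.1 then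
        let han := han + 1
        if m.1 = 27 + bakaze ∧ m.1 = 27 + jikaze then han + 1 else han
      else han) 0
      = (l.map (wA bakaze jikaze)).sum := by
    have := PySem.List.foldl_congr_mem' (l := l) (init := (0 : Int))
      (f := fun han m =>
        if m.1 = m.2.1 ∧ m.2.1 = m.2.2 ∧ S.contains m.1 then
          let han := han + 1
          if m.1 = 27 + bakaze ∧ m.1 = 27 + jikaze then han + 1 else han
        else han)
      (g := fun han m => han + wA bakaze jikaze m) ?_
    · rw [this, PySem.List.foldl_add]; simp
    · intro m _ han
      by_cases h1 : m.1 = m.2.1 ∧ m.2.1 = m.2.2 ∧ S.contains m.1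
      · by_cases h2 : m.1 = 27 + bakaze ∧ m.1 = 27 + jikaze
        · simp only [wA, ← hS, if_pos h1, if_pos h2]; omega
        · simp only [wA, ← hS, if_pos h1, if_neg h2]
      · simp only [wA, ← hS, if_neg h1]; omega
  -- B's dict is the counter of triplet heads
  have hcount : ∀ t : Int,
      (l.foldl (fun d m =>
        if m.1 = m.2.1 ∧ m.2.1 = m.2.2 then d.insert m.1 (d.getD m.1 0 + 1) else d)
        PySem.Dict.empty).getD t 0
      = (((l.filter (fun m => decide (m.1 = m.2.1 ∧ m.2.1 = m.2.2))).map (·.1)).count t : Int) := by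
    intro t
    have hm : ∀ (ll : List (Int × Int × Int)),
        ll.foldl (fun d m => d.insert m.1 (d.getD m.1 0 + 1)) (PySem.Dict.empty : PySem.Dict Int Int)
          = (ll.map (·.1)).foldl (fun d x => d.insert x (d.getD x 0 + 1)) PySem.Dict.empty := by
      intro ll; rw [List.foldl_map]
    rw [PySem.List.foldl_ite_eq_foldl_filter, hm, PySem.Dict.getD_foldl_insert_add_one]
    simp
  rw [hA, sum_wA_eq]
  set hs := ((l.filter (fun m => decide (m.1 = m.2.1 ∧ m.2.1 = m.2.2))).map (·.1)) with hhs
  have hsum : ((S : List Int).map (fun t =>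
      (l.foldl (fun d m =>
        if m.1 = m.2.1 ∧ m.2.1 = m.2.2 then d.insert m.1 (d.getD m.1 0 + 1) else d)
        PySem.Dict.empty).getD t 0)).sum
      = (hs.countP (fun t => decide (t ∈ (S : List Int))) : Int) := by
    have heq : ((S : List Int).map (fun t =>
        (l.foldl (fun d m =>
          if m.1 = m.2.1 ∧ m.2.1 = m.2.2 then d.insert m.1 (d.getD m.1 0 + 1) else d)
          PySem.Dict.empty).getD t 0)).sum
        = ((S : List Int).map (fun k => (hs.count k : Int))).sum := by
      refine congrArg List.sum (List.map_congr_left ?_)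
      intro k _; exact hcount k
    rw [heq, sum_count_nodup _ _ (by rw [hS]; exact PySem.Set.nodup_ofList _)]
  rw [hsum, ← heads_total]
  by_cases hb : bakaze = jikaze
  · rw [if_pos hb, if_pos hb, hcount (27 + bakaze)]
  · rw [if_neg hb, if_neg hb, add_zero]
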